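-- pv_equiv track=rewrite | github.com/datagora-erasme/smart_watch | core/CustomJsonToOSM.py | compress_day_ranges
-- ===== SOURCE A (Python) =====
-- from typing import Any, Dict, List, Optional
--
-- def compress_day_ranges(days: List[str]) -> str:
--     """Compress consecutive days into ranges (Mo-Fr, Sa-Su, etc.)."""
--     day_order = ["Mo", "Tu", "We", "Th", "Fr", "Sa", "Su"]
--     day_indices = {day: i for i, day in enumerate(day_order)}
--
--     # Sort days by order
--     days = sorted(days, key=lambda d: day_indices[d])
--
--     if not days:
--         return ""
--
--     ranges = []
--     start = days[0]
--     prev_idx = day_indices[start]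
--
--     for i in range(1, len(days)):
--         curr_idx = day_indices[days[i]]
--         if curr_idx != prev_idx + 1:
--             # Break in sequence
--             if start == days[i - 1]:
--                 ranges.append(start)
--             else:
--                 ranges.append(f"{start}-{days[i - 1]}")
--             start = days[i]
--         prev_idx = curr_idx
--
--     # Handle last range
--     if start == days[-1]:
--         ranges.append(start)
--     else:
--         ranges.append(f"{start}-{days[-1]}")
--
--     return ",".join(ranges)
-- ===== SOURCE B (Python) =====
-- from itertools import groupby
--
-- def compress_day_ranges(days):
--     """Compress consecutive days into ranges (Mo-Fr, Sa-Su, etc.)."""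
--     day_order = ["Mo", "Tu", "We", "Th", "Fr", "Sa", "Su"]
--     day_indices = {day: i for i, day in enumerate(day_order)}
--     days = sorted(days, key=lambda d: day_indices[d])
--     pieces = []
--     # a run of consecutive days has constant (index - position)
--     for _, grp in groupby(enumerate(days), key=lambda t: day_indices[t[1]] - t[0]):
--         run = [d for _, d in grp]
--         pieces.append(run[0] if run[0] == run[-1] else f"{run[0]}-{run[-1]}")
--     return ",".join(pieces)
-- ===== Notes on version B (the rewrite author's own statement) =====
-- stated objective: idiomatic
-- what changed: Replaces A's index loop with explicit break/start/prev_idx state by the standard sort + itertools.groupby on (day_index - position): each group is one maximal run of consecutive days, mapped directly to its piece.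
import Mathlib
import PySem

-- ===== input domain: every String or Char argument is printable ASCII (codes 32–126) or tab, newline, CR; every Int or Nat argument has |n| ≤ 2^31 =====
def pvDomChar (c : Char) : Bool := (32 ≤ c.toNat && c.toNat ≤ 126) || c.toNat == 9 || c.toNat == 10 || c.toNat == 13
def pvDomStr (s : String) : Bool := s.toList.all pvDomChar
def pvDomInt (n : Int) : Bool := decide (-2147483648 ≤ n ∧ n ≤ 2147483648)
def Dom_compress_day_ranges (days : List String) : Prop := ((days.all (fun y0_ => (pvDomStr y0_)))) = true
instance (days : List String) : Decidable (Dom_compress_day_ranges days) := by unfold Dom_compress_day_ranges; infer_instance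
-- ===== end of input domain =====

-- B replaces A's index-fold with explicit break/start/prev_idx state by sort + itertools.groupby
-- on (day_index - position), mapping each run to its piece (objective: idiomatic; same cost).

-- shared constant table: day_order and the dict {day: i for i, day in enumerate(day_order)}
def pvDayOrder : List String := ["Mo", "Tu", "We", "Th", "Fr", "Sa", "Su"]
def pvDayIndices : PySem.Dict String Int :=
  (PySem.List.enumerate pvDayOrder).foldl (fun d p => d.insert p.2 p.1) PySem.Dict.empty
-- day_indices[d]; getD is exact inside Pre_ (KeyError inputs are excluded by Pre_)
def pvIdx (d : String) : Int := pvDayIndices.getD d 0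

-- ===== PORT A =====
def compress_day_ranges (days : List String) : String :=
  let ds := PySem.List.sorted days (fun d => pvIdx d)
  match ds with
  | [] => ""
  | d0 :: _ =>
    -- for i in range(1, len(days)) with state (ranges, start, prev_idx); days[i] in range, so pyGetD is exact
    let st := (PySem.List.pyRange 1 (ds.length : Int) 1).foldl
      (fun (s : List String × String × Int) i =>
        let currIdx := pvIdx (PySem.List.pyGetD ds i "")
        if currIdx ≠ s.2.2 + 1 then
          let prevDay := PySem.List.pyGetD ds (i - 1) ""
          ((if s.2.1 == prevDay then s.1 ++ [s.2.1] else s.1 ++ [s.2.1 ++ "-" ++ prevDay]),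
           PySem.List.pyGetD ds i "", currIdx)
        else (s.1, s.2.1, currIdx))
      ([], d0, pvIdx d0)
    let lastDay := PySem.List.pyGetD ds (-1) ""   -- days[-1]; ds ≠ [], so exact
    PySem.Str.join ","
      (if st.2.1 == lastDay then st.1 ++ [st.2.1] else st.1 ++ [st.2.1 ++ "-" ++ lastDay])

-- ===== PORT B =====
-- groupby key on the enumerated pair t: day_indices[t[1]] - t[0]; adjacent elements share a group iff keys are equal
def pvGroupRel (p q : Int × String) : Bool := (pvIdx p.2 - p.1) == (pvIdx q.2 - q.1)
-- run[0] / run[-1]; groups produced by groupby are nonempty, so headD/getLastD "" are exact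
def pvPiece (g : List (Int × String)) : String :=
  let run := g.map Prod.snd
  if run.headD "" == run.getLastD "" then run.headD ""
  else run.headD "" ++ "-" ++ run.getLastD ""

def compress_day_ranges_alt (days : List String) : String :=
  let ds := PySem.List.sorted days (fun d => pvIdx d)
  PySem.Str.join "," (((PySem.List.enumerate ds).splitBy pvGroupRel).map pvPiece)

-- ===== PRECONDITION & SPEC =====
-- Pre_: every element is one of the seven weekday abbreviations; on any other element the
-- Python A raises KeyError in the sort key (it returns on exactly these inputs).
def Pre_compress_day_ranges (days : List String) : Prop :=
  (days.all (fun d => d ∈ ["Mo", "Tu", "We", "Th", "Fr", "Sa", "Su"])) = true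
instance (days : List String) : Decidable (Pre_compress_day_ranges days) := by
  unfold Pre_compress_day_ranges; infer_instance
def pvWitness_compress_day_ranges : List String := (["Fr", "Mo", "Tu", "Su"])

def Spec_compress_day_ranges (days : List String) (out : String) : Prop := out = compress_day_ranges_alt days
instance (days : List String) (out : String) : Decidable (Spec_compress_day_ranges days out) := by unfold Spec_compress_day_ranges; infer_instance

-- ===== CLAIM (what is proved, stated in full; the proofs are below) =====
def Claim_equal_compress_day_ranges : Prop := ∀ (days : List String), Dom_compress_day_ranges days → Pre_compress_day_ranges days → Spec_compress_day_ranges days (compress_day_ranges days)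

-- ===== LEMMAS AND PROOFS =====

-- the common abstract recursion both ports compute: emit one piece per maximal run
def pvEmit (s e : String) : String := if s == e then s else s ++ "-" ++ e
def pvRuns (start prev : String) : List String → List String
  | [] => [pvEmit start prev]
  | d :: rest =>
    if pvIdx d = pvIdx prev + 1 then pvRuns start d rest
    else pvEmit start prev :: pvRuns d d rest

theorem pvGetD_neg_one {α : Type} (xs : List α) (x d : α) :
    PySem.List.pyGetD (xs ++ [x]) (-1) d = x := by
  simp [PySem.List.pyGetD, PySem.List.pyGet?, PySem.List.pyIdx?]

theorem pvHeadD_append_two (l : List String) (a b d : String) :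
    ((l ++ [a]) ++ [b]).headD d = (l ++ [a]).headD d := by
  cases l <;> simp

-- A's index fold, started after prefix `pref` with current run start `start`, last seen day `prev`
theorem pvLoopA (tail : List String) : ∀ (pref : List String) (prev start : String) (ranges : List String),
    (let ds := pref ++ prev :: tail
     let st := (PySem.List.pyRange (↑pref.length + 1) (ds.length : Int) 1).foldl
      (fun (s : List String × String × Int) i =>
        let currIdx := pvIdx (PySem.List.pyGetD ds i "")
        if currIdx ≠ s.2.2 + 1 then
          let prevDay := PySem.List.pyGetD ds (i - 1) ""
          ((if s.2.1 == prevDay then s.1 ++ [s.2.1] else s.1 ++ [s.2.1 ++ "-" ++ prevDay]),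
           PySem.List.pyGetD ds i "", currIdx)
        else (s.1, s.2.1, currIdx))
      (ranges, start, pvIdx prev)
     (if st.2.1 == PySem.List.pyGetD ds (-1) "" then st.1 ++ [st.2.1]
      else st.1 ++ [st.2.1 ++ "-" ++ PySem.List.pyGetD ds (-1) ""]))
    = ranges ++ pvRuns start prev tail := by
  induction tail with
  | nil =>
    intro pref prev start ranges
    dsimp only
    have hnil : PySem.List.pyRange (↑pref.length + 1) (↑(pref ++ prev :: []).length : Int) 1 = [] := by
      simp [PySem.List.pyRange]
    rw [hnil]
    simp only [List.foldl_nil]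
    rw [show pref ++ prev :: [] = pref ++ [prev] by simp, pvGetD_neg_one]
    simp only [pvRuns, pvEmit]
    by_cases hs : start = prev <;> simp [hs]
  | cons d rest ih =>
    intro pref prev start ranges
    dsimp only
    have hcons : PySem.List.pyRange (↑pref.length + 1) (↑(pref ++ prev :: d :: rest).length : Int) 1
        = ((pref.length : Int) + 1) :: PySem.List.pyRange (↑pref.length + 1 + 1) (↑(pref ++ prev :: d :: rest).length : Int) 1 := by
      apply PySem.List.pyRange_one_cons
      simp
    have hgd : PySem.List.pyGetD (pref ++ prev :: d :: rest) (↑pref.length + 1) "" = d := by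
      rw [show ((pref.length : Int) + 1) = ((pref.length + 1 : Nat) : Int) by push_cast; ring,
        PySem.List.pyGetD_natCast]
      simp [List.getD]
    have hgp : PySem.List.pyGetD (pref ++ prev :: d :: rest) (↑pref.length + 1 - 1) "" = prev := by
      rw [show ((pref.length : Int) + 1 - 1) = ((pref.length : Nat) : Int) by ring,
        PySem.List.pyGetD_natCast]
      simp [List.getD]
    rw [hcons]
    simp only [List.foldl_cons, hgd, hgp]
    have hre : pref ++ prev :: d :: rest = (pref ++ [prev]) ++ d :: rest := by simp
    have hlen : (pref.length : Int) + 1 + 1 = ↑(pref ++ [prev]).length + 1 := by simp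
    by_cases hc : pvIdx d = pvIdx prev + 1
    · rw [if_neg (show ¬ (pvIdx d ≠ pvIdx prev + 1) by omega)]
      have := ih (pref ++ [prev]) d start ranges
      dsimp only at this
      rw [hre, hlen]
      exact this.trans (by simp [pvRuns, hc])
    · rw [if_pos (by omega : pvIdx d ≠ pvIdx prev + 1)]
      have := ih (pref ++ [prev]) d d
        (if (start == prev) = true then ranges ++ [start] else ranges ++ [start ++ "-" ++ prev])
      dsimp only at this
      rw [hre, hlen]
      refine this.trans ?_
      simp only [pvRuns, if_neg hc, pvEmit]
      by_cases hs : start = prev <;> simp [hs]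

-- B's splitBy loop flushes exactly A's pieces
theorem pvLoopB (tail : List String) : ∀ (i : Int) (prev start : String)
    (r : List (Int × String)) (acc : List (List (Int × String))),
    (r.reverse.map Prod.snd ++ [prev]).headD "" = start →
    (List.splitBy.loop pvGroupRel (PySem.List.enumerate tail (i + 1)) (i, prev) r acc).map pvPiece
      = acc.reverse.map pvPiece ++ pvRuns start prev tail := by
  induction tail with
  | nil =>
    intro i prev start r acc hs
    simp [PySem.List.enumerate, List.splitBy.loop, pvRuns, pvPiece, pvEmit, ← hs]
  | cons d rest ih =>
    intro i prev start r acc hs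
    rw [PySem.List.enumerate_cons]
    simp only [List.splitBy.loop]
    by_cases hc : pvIdx d = pvIdx prev + 1
    · have hrel : pvGroupRel (i, prev) (i + 1, d) = true := by
        simp [pvGroupRel]; omega
      rw [hrel]
      rw [ih (i + 1) d start ((i, prev) :: r) acc (by
        simp only [List.reverse_cons, List.map_append, List.map_cons, List.map_nil]
        rw [List.append_assoc]
        simpa using (pvHeadD_append_two (r.reverse.map Prod.snd) prev d "").trans hs)]
      simp [pvRuns, hc]
    · have hrel : pvGroupRel (i, prev) (i + 1, d) = false := by
        simp [pvGroupRel]; omega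
      rw [hrel]
      rw [ih (i + 1) d d [] (((i, prev) :: r).reverse :: acc) (by simp)]
      simp [pvRuns, hc, pvPiece, pvEmit, ← hs]

-- ===== VERDICT (by name: the statement is the Claim_ definition above) =====
theorem compress_day_ranges_spec : Claim_equal_compress_day_ranges := by
  intro days _ _
  unfold Spec_compress_day_ranges compress_day_ranges compress_day_ranges_alt
  cases h : PySem.List.sorted days (fun d => pvIdx d) with
  | nil => simp [PySem.List.enumerate, PySem.Str.join, List.splitBy]
  | cons d0 tail =>
    have hA := pvLoopA tail [] d0 d0 []
    have hB := pvLoopB tail 0 d0 d0 [] [] (by simp)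
    simp only [List.nil_append, List.length_nil, Nat.cast_zero, zero_add] at hA hB
    simp only [PySem.List.enumerate_cons, List.splitBy, zero_add] at *
    rw [hB, hA]
    simp
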